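-- pv_equiv track=rewrite | github.com/GregoryREvans/evans | evans/general_tools/fibonacci_cycle.py | fibonacci_cycle
-- ===== SOURCE A (Python) =====
-- def fibonacci_cycle(first_number, second_number, length, modulus, wrap_to_zero=False):
--     sequence = [first_number, second_number]
--     for _ in range(length):
--         sequence.append(sequence[-2] + sequence[-1])
--     sequence = [(_ % modulus) for _ in sequence]
--     if wrap_to_zero is False:
--         for index, item in enumerate(sequence):
--             if item == 0:
--                 sequence[index] = item + modulus
--     return sequence
-- ===== SOURCE B (Python) =====
-- def fibonacci_cycle(first_number, second_number, length, modulus, wrap_to_zero=False):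
--     def fix(x):
--         return x + modulus if (wrap_to_zero is False and x == 0) else x
--     a = first_number % modulus
--     b = second_number % modulus
--     out = [fix(a), fix(b)]
--     for _ in range(length):
--         a, b = b, (a + b) % modulus
--         out.append(fix(b))
--     return out
-- ===== Notes on version B (the rewrite author's own statement) =====
-- stated objective: faster
-- what changed: A builds the raw Fibonacci list (integers growing without bound), then mods every element in a second pass, then fixes zeros in a third enumerate pass; B generates each element in one pass with a rolling pair of already-reduced values, applying the mod and the zero-wrap inline.
-- outside the precondition, e.g. on fibonacci_cycle(1, 1, 5, 0, False): A raises ZeroDivisionError, B raises ZeroDivisionError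
import Mathlib
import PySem

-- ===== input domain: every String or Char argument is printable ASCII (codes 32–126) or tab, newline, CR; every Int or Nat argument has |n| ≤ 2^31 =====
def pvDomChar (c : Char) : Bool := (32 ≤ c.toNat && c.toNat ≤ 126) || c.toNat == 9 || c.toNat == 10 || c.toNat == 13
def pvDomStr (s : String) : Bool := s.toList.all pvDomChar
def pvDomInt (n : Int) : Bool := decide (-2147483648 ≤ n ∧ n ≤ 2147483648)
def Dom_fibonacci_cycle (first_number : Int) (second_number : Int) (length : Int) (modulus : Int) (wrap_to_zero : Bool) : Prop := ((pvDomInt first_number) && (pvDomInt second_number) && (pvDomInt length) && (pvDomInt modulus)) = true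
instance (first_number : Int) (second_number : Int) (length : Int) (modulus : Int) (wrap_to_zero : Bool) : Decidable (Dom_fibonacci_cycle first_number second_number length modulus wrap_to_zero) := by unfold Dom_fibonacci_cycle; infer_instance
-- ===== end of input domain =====

-- B fuses A's three passes (raw Fibonacci build, mod pass, zero-fix pass) into one rolling-pair loop; equivalence proved for modulus ≠ 0.

-- ===== PORT A =====
-- sequence[-2]/sequence[-1]: the list always has ≥ 2 elements, so pyGet? is always `some`; .getD 0 is never the default.
def fibonacci_cycle (first_number : Int) (second_number : Int) (length : Int) (modulus : Int) (wrap_to_zero : Bool) : List Int :=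
  let sequence := (List.range length.toNat).foldl
    (fun seq _ => seq ++ [(PySem.List.pyGet? seq (-2)).getD 0 + (PySem.List.pyGet? seq (-1)).getD 0])
    [first_number, second_number]
  let sequence := sequence.map (fun x => PySem.Int.mod x modulus)
  if wrap_to_zero = false then
    -- Python's enumerate reads each item before any later assignment can touch it, and each
    -- assignment only changes the index already passed, so folding over enumerate of the
    -- unmutated list with List.set is exact.
    (PySem.List.enumerate sequence).foldl
      (fun sq (p : Int × Int) => if p.2 = 0 then sq.set p.1.toNat (p.2 + modulus) else sq)
      sequence
  else sequence

-- ===== PORT B =====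
def fibonacci_cycle_alt (first_number : Int) (second_number : Int) (length : Int) (modulus : Int) (wrap_to_zero : Bool) : List Int :=
  let fix := fun (x : Int) => if wrap_to_zero = false ∧ x = 0 then x + modulus else x
  let a := PySem.Int.mod first_number modulus
  let b := PySem.Int.mod second_number modulus
  let st := (List.range length.toNat).foldl
    (fun (p : Int × Int × List Int) _ =>
      let nb := PySem.Int.mod (p.1 + p.2.1) modulus
      (p.2.1, nb, p.2.2 ++ [fix nb]))
    (a, b, [fix a, fix b])
  st.2.2

-- ===== PRECONDITION & SPEC =====
-- Pre_ excludes modulus = 0, on which the Python A raises ZeroDivisionError.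
def Pre_fibonacci_cycle (first_number : Int) (second_number : Int) (length : Int) (modulus : Int) (wrap_to_zero : Bool) : Prop := modulus ≠ 0
instance (first_number : Int) (second_number : Int) (length : Int) (modulus : Int) (wrap_to_zero : Bool) : Decidable (Pre_fibonacci_cycle first_number second_number length modulus wrap_to_zero) := by unfold Pre_fibonacci_cycle; infer_instance
def pvWitness_fibonacci_cycle : Int × Int × Int × Int × Bool := (0, 1, 5, 3, false)

def Spec_fibonacci_cycle (first_number : Int) (second_number : Int) (length : Int) (modulus : Int) (wrap_to_zero : Bool) (out : List Int) : Prop := out = fibonacci_cycle_alt first_number second_number length modulus wrap_to_zero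
instance (first_number : Int) (second_number : Int) (length : Int) (modulus : Int) (wrap_to_zero : Bool) (out : List Int) : Decidable (Spec_fibonacci_cycle first_number second_number length modulus wrap_to_zero out) := by unfold Spec_fibonacci_cycle; infer_instance

-- ===== CLAIM (what is proved, stated in full; the proofs are below) =====
def Claim_equal_fibonacci_cycle : Prop := ∀ (first_number : Int) (second_number : Int) (length : Int) (modulus : Int) (wrap_to_zero : Bool), Dom_fibonacci_cycle first_number second_number length modulus wrap_to_zero → Pre_fibonacci_cycle first_number second_number length modulus wrap_to_zero → Spec_fibonacci_cycle first_number second_number length modulus wrap_to_zero (fibonacci_cycle first_number second_number length modulus wrap_to_zero)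

-- ===== LEMMAS AND PROOFS =====

-- the raw Fibonacci-like sequence both programs are built on
def pvFib (f s : Int) : Nat → Int
  | 0 => f
  | 1 => s
  | n + 2 => pvFib f s n + pvFib f s (n + 1)

lemma range_map_snoc2 (g : Nat → Int) (k : Nat) :
    (List.range (k + 2)).map g = (List.range k).map g ++ [g k, g (k + 1)] := by
  rw [List.range_succ, List.range_succ, List.map_append, List.map_append]
  simp

lemma pyGet_snoc2_neg_two (xs : List Int) (x y : Int) :
    PySem.List.pyGet? (xs ++ [x, y]) (-2) = some x := by
  simp [PySem.List.pyGet?, PySem.List.pyIdx?]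

lemma pyGet_snoc2_neg_one (xs : List Int) (x y : Int) :
    PySem.List.pyGet? (xs ++ [x, y]) (-1) = some y := by
  simp [PySem.List.pyGet?, PySem.List.pyIdx?]

lemma loopA_eq (f s : Int) (k : Nat) :
    (List.range k).foldl
        (fun seq _ => seq ++ [(PySem.List.pyGet? seq (-2)).getD 0 + (PySem.List.pyGet? seq (-1)).getD 0])
        [f, s]
      = (List.range (k + 2)).map (pvFib f s) := by
  induction k with
  | zero => simp [pvFib, List.range_succ]
  | succ k ih =>
      rw [List.range_succ, List.foldl_append, ih]
      rw [range_map_snoc2 (pvFib f s) k]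
      simp only [List.foldl_cons, List.foldl_nil, pyGet_snoc2_neg_two, pyGet_snoc2_neg_one,
        Option.getD_some]
      rw [show (k + 1 + 2) = (k + 2) + 1 from rfl, List.range_succ, List.map_append,
        range_map_snoc2 (pvFib f s) k]
      simp [pvFib, List.append_assoc]

lemma mod_add_mod (a b m : Int) :
    PySem.Int.mod (PySem.Int.mod a m + PySem.Int.mod b m) m = PySem.Int.mod (a + b) m := by
  simp [PySem.Int.mod]

lemma loopB_eq (f s m : Int) (w : Bool) (k : Nat) :
    (List.range k).foldl
        (fun (p : Int × Int × List Int) _ =>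
          (p.2.1, PySem.Int.mod (p.1 + p.2.1) m,
            p.2.2 ++ [if w = false ∧ PySem.Int.mod (p.1 + p.2.1) m = 0
                      then PySem.Int.mod (p.1 + p.2.1) m + m
                      else PySem.Int.mod (p.1 + p.2.1) m]))
        (PySem.Int.mod f m, PySem.Int.mod s m,
          [if w = false ∧ PySem.Int.mod f m = 0 then PySem.Int.mod f m + m else PySem.Int.mod f m,
           if w = false ∧ PySem.Int.mod s m = 0 then PySem.Int.mod s m + m else PySem.Int.mod s m])
      = (PySem.Int.mod (pvFib f s k) m, PySem.Int.mod (pvFib f s (k + 1)) m,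
          (List.range (k + 2)).map (fun n =>
            if w = false ∧ PySem.Int.mod (pvFib f s n) m = 0
            then PySem.Int.mod (pvFib f s n) m + m
            else PySem.Int.mod (pvFib f s n) m)) := by
  induction k with
  | zero => simp [pvFib, List.range_succ]
  | succ k ih =>
      rw [List.range_succ, List.foldl_append, ih]
      simp only [List.foldl_cons, List.foldl_nil]
      rw [mod_add_mod]
      rw [show (k + 1 + 1) = k + 2 from rfl]
      conv_rhs => rw [show (k + 1 + 2) = (k + 2) + 1 from rfl, List.range_succ]
      simp [pvFib]

lemma enum_set_eq (m : Int) (l : List Int) : ∀ (pre : List Int),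
    (PySem.List.enumerate l (pre.length : Int)).foldl
        (fun sq (p : Int × Int) => if p.2 = 0 then sq.set p.1.toNat (p.2 + m) else sq)
        (pre ++ l)
      = pre ++ l.map (fun x => if x = 0 then x + m else x) := by
  induction l with
  | nil => simp [PySem.List.enumerate]
  | cons x t ih =>
      intro pre
      rw [PySem.List.enumerate_cons, List.foldl_cons]
      by_cases hx : x = 0
      · subst hx
        simp only [Int.toNat_natCast]
        have hset : (pre ++ 0 :: t).set pre.length ((0 : Int) + m) = (pre ++ [(0 : Int) + m]) ++ t := by
          simp
        have h := ih (pre ++ [(0 : Int) + m])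
        simp only [List.length_append, List.length_cons, List.length_nil, Nat.cast_add,
          Nat.cast_one, Nat.zero_add] at h ⊢
        rw [if_pos trivial, hset, h]
        simp
      · simp only [Int.toNat_natCast, if_neg hx]
        have h := ih (pre ++ [x])
        simp only [List.length_append, List.length_cons, List.length_nil, Nat.cast_add,
          Nat.cast_one, Nat.zero_add] at h ⊢
        rw [show (pre ++ x :: t) = (pre ++ [x]) ++ t by simp, h]
        simp [hx]

-- ===== VERDICT (by name: the statement is the Claim_ definition above) =====
theorem fibonacci_cycle_spec : Claim_equal_fibonacci_cycle := by
  intro f s len m wrap _ _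
  unfold Spec_fibonacci_cycle fibonacci_cycle fibonacci_cycle_alt
  simp only [loopA_eq, loopB_eq]
  rw [List.map_map]
  cases wrap with
  | false =>
      rw [if_pos rfl]
      have h := enum_set_eq m ((List.range (len.toNat + 2)).map
        (fun n => PySem.Int.mod (pvFib f s n) m)) []
      simp only [List.length_nil, Nat.cast_zero, List.nil_append] at h
      simp only [Function.comp_def]
      rw [h, List.map_map]
      simp
  | true =>
      simp
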